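-- pv_equiv track=rewrite | github.com/shauryasf/Advent-of-code | AOC 2024/day25.py | solve
-- ===== SOURCE A (Python) =====
-- from itertools import product
--
-- def solve(data):
--     data = data.split("\n\n")
--     locks = []
--     keys = []
--     n = -1
--     b = -1
--     for i in data:
--         m = i.split("\n")
--         n = len(m)
--         b = len(m[0])
--         if all(m[0][j] == "." for j in range(len(m[0]))):
--             key = []
--             for column in range(len(m[0])):
--                 h = 0
--                 for j in range(len(m) - 2, -1, -1):
--                     if m[j][column] == "#":
--                         h += 1
--                     else:
--                         break
--                 key.append(h)
--             keys.append(key)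
--         else:
--             lock = []
--             for column in range(len(m[0])):
--                 h = 0
--                 for j in range(1, len(m)):
--                     if m[j][column] == "#":
--                         h += 1
--                     else:
--                         break
--                 lock.append(h)
--
--             locks.append(lock)
--
--
--     res = 0
--
--     for c in product(locks, keys):
--         lock, key = c
--         if all(lock[i] + key[i] + 2 <= n for i in range(b)):
--             res += 1
--
--     return res
-- ===== SOURCE B (Python) =====
-- def _popcount(m):
--     c = 0
--     while m:
--         c += m & 1
--         m >>= 1
--     return c
--
--
-- def _column(m, i):
--     return "".join(row[i] for row in m)
--
--
-- def _key_h(m, i):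
--     t = _column(m, i)[:-1]
--     return len(t) - len(t.rstrip("#"))
--
--
-- def _lock_h(m, i):
--     t = _column(m, i)[1:]
--     return len(t) - len(t.lstrip("#"))
--
--
-- def _ormask(kh, i, t):
--     acc = 0
--     for j in range(len(kh)):
--         if kh[j][i] <= t:
--             acc |= 1 << j
--     return acc
--
--
-- def solve(data):
--     blocks = [blk.split("\n") for blk in data.split("\n\n")]
--     n = len(blocks[0])
--     b = len(blocks[0][0])
--     keys = [m for m in blocks if m[0] == "." * len(m[0])]
--     locks = [m for m in blocks if m[0] != "." * len(m[0])]
--     kh = [[_key_h(m, i) for i in range(b)] for m in keys]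
--     # per-column cumulative bitmask index: bit j of cum[i][t] says key j fits a
--     # column-i gap of t; a lock is then answered by one AND per column + popcount
--     cum = [[_ormask(kh, i, t) for t in range(n)] for i in range(b)]
--     full = (1 << len(keys)) - 1
--     res = 0
--     for m in locks:
--         mask = full
--         for i in range(b):
--             t = n - 2 - _lock_h(m, i)
--             mask &= cum[i][t] if t >= 0 else 0
--         res += _popcount(mask)
--     return res
-- ===== Notes on version B (the rewrite author's own statement) =====
-- stated objective: alternative
-- what changed: B replaces A's pairwise lock-x-key scan with a per-column cumulative bitmask index over the keys (bit j of cum[i][t] = key j fits a column-i gap of t), answers each lock by one AND per column plus a popcount, and measures pin heights by strip-length arithmetic on joined column strings instead of index loops.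
-- outside the precondition, e.g. on solve('#.\n#.\n..\n\n..\n#.'): A returns 0, B returns 1
import Mathlib
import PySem

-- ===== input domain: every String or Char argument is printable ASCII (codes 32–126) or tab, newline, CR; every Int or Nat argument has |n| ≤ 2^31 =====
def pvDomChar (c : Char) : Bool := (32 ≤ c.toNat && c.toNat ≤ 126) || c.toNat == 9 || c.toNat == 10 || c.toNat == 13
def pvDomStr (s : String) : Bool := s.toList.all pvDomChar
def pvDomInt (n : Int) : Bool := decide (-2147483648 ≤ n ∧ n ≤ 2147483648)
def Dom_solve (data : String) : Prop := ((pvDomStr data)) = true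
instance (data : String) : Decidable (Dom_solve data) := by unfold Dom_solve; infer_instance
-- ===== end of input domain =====

-- B replaces A's pairwise lock-by-key scan with a per-column cumulative bitmask index over the keys
-- (bit j of cum[i][t] = key j fits a column-i gap of t): each lock is answered by one AND per column
-- plus a popcount; same value as A on rectangular inputs (Pre_solve).

-- ===== PORT A =====
-- the inner 'h = 0; for j in js: if m[j][column] == "#": h += 1 else: break' loop
def hScanA (m : List (List Char)) (col : Int) : List Int → Int
  | [] => 0
  | j :: rest =>
      if PySem.List.pyGetD (PySem.List.pyGetD m j []) col ' ' == '#' then 1 + hScanA m col rest else 0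

-- 'key = []; for column in range(len(m[0])): … key.append(h)'
def keyProfA (m : List (List Char)) : List Int :=
  (PySem.List.pyRange 0 (PySem.List.len (PySem.List.pyGetD m 0 []))).foldl
    (fun key col => key ++ [hScanA m col (PySem.List.pyRange (PySem.List.len m - 2) (-1) (-1))]) []

-- 'lock = []; for column in range(len(m[0])): … lock.append(h)'
def lockProfA (m : List (List Char)) : List Int :=
  (PySem.List.pyRange 0 (PySem.List.len (PySem.List.pyGetD m 0 []))).foldl
    (fun lock col => lock ++ [hScanA m col (PySem.List.pyRange 1 (PySem.List.len m))]) []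

-- one iteration of 'for i in data: …' (state: locks, keys, n, b)
def stepA (st : List (List Int) × List (List Int) × Int × Int) (i : List Char) :
    List (List Int) × List (List Int) × Int × Int :=
  let m := PySem.Chars.splitOn i ['\n']
  if (PySem.List.pyRange 0 (PySem.List.len (PySem.List.pyGetD m 0 []))).all
      (fun j => PySem.List.pyGetD (PySem.List.pyGetD m 0 []) j ' ' == '.') then
    (st.1, st.2.1 ++ [keyProfA m], PySem.List.len m, PySem.List.len (PySem.List.pyGetD m 0 []))
  else
    (st.1 ++ [lockProfA m], st.2.1, PySem.List.len m, PySem.List.len (PySem.List.pyGetD m 0 []))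

def solve (data : String) : Int :=
  let ds := PySem.Chars.splitOn data.toList ['\n', '\n']
  let st := ds.foldl stepA ([], [], -1, -1)
  -- 'for c in product(locks, keys): …' (= the nested loop over locks then keys)
  st.1.foldl (fun res lock =>
    st.2.1.foldl (fun res key =>
      if (PySem.List.pyRange 0 st.2.2.2).all
          (fun i => decide (PySem.List.pyGetD lock i 0 + PySem.List.pyGetD key i 0 + 2 ≤ st.2.2.1))
      then res + 1 else res) res) 0

-- ===== PORT B =====
-- Source B _popcount: 'c = 0; while m: c += m & 1; m >>= 1'
def pvPopcount : Nat → Nat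
  | 0 => 0
  | m + 1 => (m + 1) % 2 + pvPopcount ((m + 1) / 2)
decreasing_by exact Nat.div_lt_self (Nat.succ_pos m) one_lt_two

-- Source B _column: '"".join(row[i] for row in m)'
def colC (m : List (List Char)) (i : Int) : List Char :=
  m.map (fun row => PySem.List.pyGetD row i ' ')

-- 't.rstrip("#")' / 't.lstrip("#")' (exact for '#'-stripping: drop the trailing/leading run of '#')
def pvRstrip (t : List Char) : List Char := (t.reverse.dropWhile (fun c => c == '#')).reverse
def pvLstrip (t : List Char) : List Char := t.dropWhile (fun c => c == '#')

-- Source B _key_h: 't = _column(m, i)[:-1]; len(t) - len(t.rstrip("#"))'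
def keyH (m : List (List Char)) (i : Int) : Int :=
  ((PySem.List.slice (colC m i) none (some (-1))).length : Int) -
    ((pvRstrip (PySem.List.slice (colC m i) none (some (-1)))).length : Int)

-- Source B _lock_h: 't = _column(m, i)[1:]; len(t) - len(t.lstrip("#"))'
def lockH (m : List (List Char)) (i : Int) : Int :=
  ((PySem.List.slice (colC m i) (some 1) none).length : Int) -
    ((pvLstrip (PySem.List.slice (colC m i) (some 1) none)).length : Int)

-- Source B _ormask: 'acc = 0; for j in range(len(kh)): if kh[j][i] <= t: acc |= 1 << j'
def ormask (kh : List (List Int)) (i : Int) (t : Int) : Nat :=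
  (PySem.List.pyRange 0 (PySem.List.len kh)).foldl
    (fun acc j =>
      if PySem.List.pyGetD (PySem.List.pyGetD kh j []) i 0 ≤ t then acc ||| (1 <<< j.toNat) else acc) 0

def solve_alt (data : String) : Int :=
  let blocks := (PySem.Chars.splitOn data.toList ['\n', '\n']).map (fun s => PySem.Chars.splitOn s ['\n'])
  let n := PySem.List.len (PySem.List.pyGetD blocks 0 [])
  let b := PySem.List.len (PySem.List.pyGetD (PySem.List.pyGetD blocks 0 []) 0 [])
  let keys := blocks.filter (fun m =>
    PySem.List.pyGetD m 0 [] == PySem.List.pyRepeat ['.'] (PySem.List.len (PySem.List.pyGetD m 0 [])))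
  let locks := blocks.filter (fun m =>
    !(PySem.List.pyGetD m 0 [] == PySem.List.pyRepeat ['.'] (PySem.List.len (PySem.List.pyGetD m 0 []))))
  let kh := keys.map (fun m => (PySem.List.pyRange 0 b).map (fun i => keyH m i))
  let cum := (PySem.List.pyRange 0 b).map (fun i => (PySem.List.pyRange 0 n).map (fun t => ormask kh i t))
  let full := (1 <<< keys.length) - 1
  locks.foldl (fun res m =>
    res + (pvPopcount ((PySem.List.pyRange 0 b).foldl (fun mask i =>
        mask &&& (if 0 ≤ n - 2 - lockH m i
                  then PySem.List.pyGetD (PySem.List.pyGetD cum i []) (n - 2 - lockH m i) 0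
                  else 0)) full) : Int)) 0

-- ===== PRECONDITION & SPEC =====
-- Pre_ restricts to the puzzle's natural domain: every block is a rectangular grid and all blocks
-- share the same dimensions. Outside it A either raises IndexError on a short row or accidentally
-- compares one block's heights against the LAST block's dimensions (leftover loop state n, b).
def Pre_solve (data : String) : Prop :=
  let bs := (PySem.Chars.splitOn data.toList ['\n', '\n']).map (fun s => PySem.Chars.splitOn s ['\n'])
  ∀ m ∈ bs, m.length = bs.headI.length ∧ ∀ r ∈ m, r.length = bs.headI.headI.length
instance (data : String) : Decidable (Pre_solve data) := by unfold Pre_solve; infer_instance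

def pvWitness_solve : String := "#\n.\n\n.\n#"

def Spec_solve (data : String) (out : Int) : Prop := out = solve_alt data
instance (data : String) (out : Int) : Decidable (Spec_solve data out) := by unfold Spec_solve; infer_instance

-- ===== CLAIM (what is proved, stated in full; the proofs are below) =====
def Claim_equal_solve : Prop := ∀ (data : String), Dom_solve data → Pre_solve data → Spec_solve data (solve data)

-- ===== LEMMAS AND PROOFS =====

-- leading-'#' run length (proof-side bridge between A's break-loop and B's strip arithmetic)
def pvRunlen : List Char → Int
  | [] => 0
  | c :: rest => if c != '#' then 0 else 1 + pvRunlen rest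

-- A's inner break-loop over indices js is the leading-run count of the corresponding characters
theorem hScanA_eq (m : List (List Char)) (col : Int) (js : List Int) :
    hScanA m col js = pvRunlen (js.map (fun j => PySem.List.pyGetD (PySem.List.pyGetD m j []) col ' ')) := by
  induction js with
  | nil => rfl
  | cons j rest ih =>
      simp only [hScanA, List.map_cons, pvRunlen, ih, bne]
      by_cases h : PySem.List.pyGetD (PySem.List.pyGetD m j []) col ' ' = '#'
      · simp [h]
      · simp [h]

-- the descending range in A's key scan, as a map over List.range
theorem pyRange_down (R : Nat) :
    PySem.List.pyRange ((R : Int) - 2) (-1) (-1) =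
      (List.range (R - 1)).map (fun k => ((R - 2 - k : Nat) : Int)) := by
  by_cases h : (-1 : Int) < (R : Int) - 2
  · have hR : 2 ≤ R := by omega
    simp only [PySem.List.pyRange]
    rw [if_neg (by norm_num)]
    rw [if_neg (by norm_num), if_pos h]
    have hc : ((((R : Int) - 2) - (-1) + -(-1) - 1) / -(-1)).toNat = R - 1 := by
      have : (((R : Int) - 2) - (-1) + -(-1) - 1) / -(-1) = (R : Int) - 1 := by
        norm_num
        omega
      rw [this]; omega
    rw [hc]
    apply List.map_congr_left
    intro k hk
    rw [List.mem_range] at hk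
    push_cast [Nat.cast_sub (by omega : k ≤ R - 2), Nat.cast_sub (by omega : 2 ≤ R)]
    ring
  · have hR : R ≤ 1 := by omega
    have h1 : R - 1 = 0 := by omega
    simp only [PySem.List.pyRange, h1]
    rw [if_neg (by norm_num)]
    rw [if_neg (by norm_num), if_neg h]
    simp

-- the ascending range in A's lock scan
theorem pyRange_up (R : Nat) :
    PySem.List.pyRange 1 (R : Int) = (List.range (R - 1)).map (fun k => ((k + 1 : Nat) : Int)) := by
  rw [PySem.List.pyRange_of_pos 1 (R : Int) (by norm_num)]
  by_cases h : (1 : Int) < (R : Int)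
  · rw [if_pos h]
    have hc : (((R : Int) - 1 + 1 - 1) / 1).toNat = R - 1 := by
      rw [Int.ediv_one]; omega
    rw [hc]
    apply List.map_congr_left
    intro k hk
    push_cast
    ring
  · rw [if_neg h]
    have h1 : R - 1 = 0 := by omega
    simp [h1]

-- B's strip arithmetic computes the run length of the (reversed) slice
theorem runlen_takeWhile (l : List Char) :
    pvRunlen l = ((l.takeWhile (fun c => c == '#')).length : Int) := by
  induction l with
  | nil => rfl
  | cons c rest ih =>
      simp only [pvRunlen, List.takeWhile_cons, bne]
      by_cases h : c = '#'
      · simp [h, ih]; omega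
      · simp [h]

theorem keyH_runlen (m : List (List Char)) (i : Int) :
    keyH m i = pvRunlen ((PySem.List.slice (colC m i) none (some (-1))).reverse) := by
  unfold keyH pvRstrip
  have hsplit := congrArg List.length
    (List.takeWhile_append_dropWhile (p := fun c => c == '#')
      (l := (PySem.List.slice (colC m i) none (some (-1))).reverse))
  rw [List.length_append] at hsplit
  rw [runlen_takeWhile]
  simp only [List.length_reverse] at hsplit ⊢
  omega

theorem lockH_runlen (m : List (List Char)) (i : Int) :
    lockH m i = pvRunlen (PySem.List.slice (colC m i) (some 1) none) := by
  unfold lockH pvLstrip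
  have hsplit := congrArg List.length
    (List.takeWhile_append_dropWhile (p := fun c => c == '#')
      (l := PySem.List.slice (colC m i) (some 1) none))
  rw [List.length_append] at hsplit
  rw [runlen_takeWhile]
  omega

theorem runlen_nonneg (l : List Char) : 0 ≤ pvRunlen l := by
  rw [runlen_takeWhile]; positivity

theorem keyH_nonneg (m : List (List Char)) (i : Int) : 0 ≤ keyH m i := by
  rw [keyH_runlen]; exact runlen_nonneg _

theorem lockH_nonneg (m : List (List Char)) (i : Int) : 0 ≤ lockH m i := by
  rw [lockH_runlen]; exact runlen_nonneg _

-- A's per-block profiles are exactly B's height functions, column by column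
theorem keyProfA_map (m : List (List Char)) :
    keyProfA m = (PySem.List.pyRange 0 (PySem.List.len (PySem.List.pyGetD m 0 []))).map
      (fun c => keyH m c) := by
  unfold keyProfA
  rw [PySem.List.foldl_append_singleton_eq_map]
  simp only [List.nil_append, PySem.List.len_eq, PySem.List.pyRange_zero_natCast, List.map_map]
  apply List.map_congr_left
  intro k _
  simp only [Function.comp]
  rw [hScanA_eq, keyH_runlen, PySem.List.slice_to_neg_one]
  congr 1
  rw [pyRange_down m.length, List.map_map]
  apply List.ext_getElem
  · simp [colC]
  · intro idx h1 h2
    simp only [List.length_map, List.length_range] at h1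
    simp only [List.getElem_map, List.getElem_range, Function.comp,
      List.getElem_reverse, List.getElem_dropLast, List.length_dropLast, List.length_map,
      PySem.List.pyGetD_natCast, colC]
    congr 1
    rw [List.getD_eq_getElem _ _ (by omega)]
    congr 1

theorem lockProfA_map (m : List (List Char)) :
    lockProfA m = (PySem.List.pyRange 0 (PySem.List.len (PySem.List.pyGetD m 0 []))).map
      (fun c => lockH m c) := by
  unfold lockProfA
  rw [PySem.List.foldl_append_singleton_eq_map]
  simp only [List.nil_append, PySem.List.len_eq, PySem.List.pyRange_zero_natCast, List.map_map]
  apply List.map_congr_left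
  intro k _
  simp only [Function.comp]
  rw [hScanA_eq, lockH_runlen, PySem.List.slice_from_one]
  congr 1
  rw [pyRange_up m.length, List.map_map]
  apply List.ext_getElem
  · simp [colC]
  · intro idx h1 h2
    simp only [List.length_map, List.length_range] at h1
    simp only [List.getElem_map, List.getElem_range, Function.comp, List.getElem_tail,
      PySem.List.pyGetD_natCast, colC]
    congr 1
    rw [List.getD_eq_getElem _ _ (by omega)]

-- A's all-dots test equals B's replicate comparison
theorem cond_eq (m0 : List Char) :
    ((PySem.List.pyRange 0 (PySem.List.len m0)).all
      (fun j => PySem.List.pyGetD m0 j ' ' == '.')) =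
    (m0 == PySem.List.pyRepeat ['.'] (PySem.List.len m0)) := by
  rw [PySem.List.len_eq, PySem.List.pyRange_zero_natCast, PySem.List.pyRepeat_singleton]
  rw [Bool.eq_iff_iff]
  simp only [List.all_eq_true, List.mem_map, List.mem_range, beq_iff_eq, Int.toNat_natCast]
  constructor
  · intro h
    rw [List.eq_replicate_iff]
    refine ⟨rfl, ?_⟩
    intro c hc
    obtain ⟨idx, hidx, hcc⟩ := List.mem_iff_getElem.mp hc
    have h2 := h (↑idx) ⟨idx, hidx, rfl⟩
    rw [PySem.List.pyGetD_natCast, List.getD_eq_getElem _ _ hidx] at h2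
    rw [← hcc]; exact h2
  · intro h j hj
    obtain ⟨kk, hkk, rfl⟩ := hj
    rw [PySem.List.pyGetD_natCast, List.getD_eq_getElem _ _ hkk]
    rw [List.eq_replicate_iff] at h
    exact h.2 _ (List.getElem_mem hkk)

def isKeyB (m : List (List Char)) : Bool :=
  PySem.List.pyGetD m 0 [] == PySem.List.pyRepeat ['.'] (PySem.List.len (PySem.List.pyGetD m 0 []))

theorem foldA_char (R0 W0 : Nat) : ∀ (ds : List (List Char)),
    (∀ i ∈ ds, (PySem.Chars.splitOn i ['\n']).length = R0) →
    (∀ i ∈ ds, (PySem.List.pyGetD (PySem.Chars.splitOn i ['\n']) 0 []).length = W0) →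
    ∀ (locks keys : List (List Int)) (n b : Int),
    ds.foldl stepA (locks, keys, n, b) =
      (locks ++ (((ds.map (fun i => PySem.Chars.splitOn i ['\n'])).filter (fun m => !isKeyB m)).map lockProfA),
       keys ++ (((ds.map (fun i => PySem.Chars.splitOn i ['\n'])).filter isKeyB).map keyProfA),
       if ds.isEmpty then n else (R0 : Int),
       if ds.isEmpty then b else (W0 : Int)) := by
  intro ds
  induction ds with
  | nil => intro _ _ locks keys n b; simp
  | cons i ds ih =>
      intro hn hb locks keys n b
      have hni := hn i (by simp)
      have hbi := hb i (by simp)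
      have hn' : ∀ x ∈ ds, (PySem.Chars.splitOn x ['\n']).length = R0 :=
        fun x hx => hn x (List.mem_cons_of_mem _ hx)
      have hb' : ∀ x ∈ ds, (PySem.List.pyGetD (PySem.Chars.splitOn x ['\n']) 0 []).length = W0 :=
        fun x hx => hb x (List.mem_cons_of_mem _ hx)
      have hlm : PySem.List.len (PySem.Chars.splitOn i ['\n']) = (R0 : Int) := by
        rw [PySem.List.len_eq, hni]
      have hlb : PySem.List.len (PySem.List.pyGetD (PySem.Chars.splitOn i ['\n']) 0 []) = (W0 : Int) := by
        rw [PySem.List.len_eq, hbi]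
      rw [List.foldl_cons]
      by_cases hc : isKeyB (PySem.Chars.splitOn i ['\n'])
      · have hstep : stepA (locks, keys, n, b) i =
            (locks, keys ++ [keyProfA (PySem.Chars.splitOn i ['\n'])], (R0 : Int), (W0 : Int)) := by
          simp only [stepA]
          rw [cond_eq]
          unfold isKeyB at hc
          rw [if_pos hc, hlm, hlb]
        rw [hstep, ih hn' hb']
        simp [hc, List.append_assoc]
      · have hstep : stepA (locks, keys, n, b) i =
            (locks ++ [lockProfA (PySem.Chars.splitOn i ['\n'])], keys, (R0 : Int), (W0 : Int)) := by
          simp only [stepA]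
          rw [cond_eq]
          unfold isKeyB at hc
          rw [if_neg hc, hlm, hlb]
        rw [hstep, ih hn' hb']
        simp [hc, List.append_assoc]

-- bit-level characterizations -----------------------------------------------------------------

theorem testBit_one_shiftLeft (a j : Nat) : (1 <<< a).testBit j = decide (a = j) := by
  rw [Nat.one_shiftLeft]
  by_cases h : a = j
  · subst h; simp [Nat.testBit_two_pow_self]
  · simp [Nat.testBit_two_pow_of_ne h, h]

theorem orFold_testBit (p : Nat → Prop) [DecidablePred p] (l : List Nat) (acc : Nat) (j : Nat) :
    (l.foldl (fun a k => if p k then a ||| (1 <<< k) else a) acc).testBit j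
      = (acc.testBit j || (decide (j ∈ l) && decide (p j))) := by
  induction l generalizing acc with
  | nil => simp
  | cons a l ih =>
      rw [List.foldl_cons, ih]
      by_cases hpa : p a
      · rw [if_pos hpa, Nat.testBit_or, testBit_one_shiftLeft]
        by_cases hja : a = j
        · subst hja; simp [hpa]
        · have hja' : ¬ j = a := fun h => hja h.symm
          simp [hja, hja', List.mem_cons]
      · rw [if_neg hpa]
        by_cases hja : a = j
        · subst hja; simp [hpa, List.mem_cons]
        · have hja' : ¬ j = a := fun h => hja h.symm
          simp [hja', List.mem_cons]

theorem ormask_testBit (kh : List (List Int)) (i t : Int) (j : Nat) :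
    (ormask kh i t).testBit j =
      (decide (j < kh.length) &&
        decide (PySem.List.pyGetD (PySem.List.pyGetD kh (j : Int) []) i 0 ≤ t)) := by
  unfold ormask
  rw [PySem.List.len_eq, PySem.List.pyRange_zero_natCast, List.foldl_map]
  have hfn : (fun (acc : Nat) (k : Nat) =>
      if PySem.List.pyGetD (PySem.List.pyGetD kh (k : Int) []) i 0 ≤ t
      then acc ||| (1 <<< ((k : Int)).toNat) else acc) =
      (fun (acc : Nat) (k : Nat) =>
        if PySem.List.pyGetD (PySem.List.pyGetD kh (k : Int) []) i 0 ≤ t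
        then acc ||| (1 <<< k) else acc) := by
    funext acc k
    simp
  rw [hfn, orFold_testBit (fun k => PySem.List.pyGetD (PySem.List.pyGetD kh (k : Int) []) i 0 ≤ t)]
  simp

theorem andFold_testBit (g : Int → Nat) (l : List Int) (acc : Nat) (j : Nat) :
    (l.foldl (fun m i => m &&& g i) acc).testBit j
      = (acc.testBit j && l.all (fun i => (g i).testBit j)) := by
  induction l generalizing acc with
  | nil => simp
  | cons a l ih =>
      rw [List.foldl_cons, ih, Nat.testBit_and, List.all_cons, Bool.and_assoc]

theorem andFold_le (g : Int → Nat) (l : List Int) (acc : Nat) :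
    (l.foldl (fun m i => m &&& g i) acc) ≤ acc := by
  induction l generalizing acc with
  | nil => exact le_refl _
  | cons a l ih => exact le_trans (ih _) (Nat.and_le_left)

theorem testBit_full (K j : Nat) : ((1 <<< K) - 1).testBit j = decide (j < K) := by
  rw [Nat.one_shiftLeft, Nat.testBit_two_pow_sub_one]

theorem pvPopcount_eq (K : Nat) : ∀ m, m < 2 ^ K →
    pvPopcount m = (List.range K).countP (fun j => m.testBit j) := by
  induction K with
  | zero =>
      intro m hm
      have : m = 0 := by omega
      subst this; simp [pvPopcount]
  | succ K ih =>
      intro m hm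
      match m with
      | 0 => simp [pvPopcount]
      | m + 1 =>
          rw [pvPopcount, List.range_succ_eq_map, List.countP_cons, List.countP_map]
          have hdiv : (m + 1) / 2 < 2 ^ K := by
            have : 2 ^ (K + 1) = 2 * 2 ^ K := by ring
            omega
          rw [ih _ hdiv]
          have hsucc : ∀ n : Nat, (m + 1).testBit (n + 1) = ((m + 1) / 2).testBit n := by
            intro n
            rw [Nat.testBit_add_one]
          have hcnt : (List.range K).countP ((fun j => (m + 1).testBit j) ∘ Nat.succ) =
              (List.range K).countP (fun j => ((m + 1) / 2).testBit j) := by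
            apply List.countP_congr
            intro n _
            simp [Function.comp, hsucc n]
          rw [hcnt]
          rw [Nat.testBit_zero]
          split_ifs with h0
          · simp at h0; omega
          · simp at h0; omega

theorem countP_range_getD (l : List (List Int)) (p : List Int → Bool) :
    (List.range l.length).countP (fun j => p (l.getD j [])) = l.countP p := by
  induction l with
  | nil => simp
  | cons a l ih =>
      rw [List.length_cons, List.range_succ_eq_map, List.countP_cons, List.countP_map]
      have : (List.range l.length).countP ((fun j => p ((a :: l).getD j [])) ∘ Nat.succ) =
          (List.range l.length).countP (fun j => p (l.getD j [])) := by
        apply List.countP_congr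
        intro n _
        simp [Function.comp]
      rw [this, ih, List.countP_cons]
      simp

-- main theorem ---------------------------------------------------------------------------------

theorem getD_pyRange_map {α : Type} (W0 : Nat) (f : Int → α) (d : α) (k : Nat) (hk : k < W0) :
    PySem.List.pyGetD ((PySem.List.pyRange 0 (W0 : Int)).map f) (k : Int) d = f (k : Int) := by
  rw [PySem.List.pyRange_zero_natCast, List.map_map, PySem.List.pyGetD_natCast]
  rw [List.getD_eq_getElem _ _ (by simpa using hk)]
  simp

theorem all_congr_mem {α : Type} (l : List α) (p q : α → Bool) (h : ∀ x ∈ l, p x = q x) :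
    l.all p = l.all q := by
  induction l with
  | nil => rfl
  | cons a l ih =>
      simp only [List.all_cons]
      rw [h a (by simp), ih (fun x hx => h x (List.mem_cons_of_mem _ hx))]

theorem countP_congr_mem {α : Type} (l : List α) (p q : α → Bool) (h : ∀ a ∈ l, p a = q a) :
    l.countP p = l.countP q := by
  induction l with
  | nil => rfl
  | cons a l ih =>
      rw [List.countP_cons, List.countP_cons, h a (by simp),
        ih (fun x hx => h x (List.mem_cons_of_mem _ hx))]

theorem popcount_andFold (K : Nat) (g : Int → Nat) (l : List Int) :
    pvPopcount (l.foldl (fun mask i => mask &&& g i) ((1 <<< K) - 1))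
      = (List.range K).countP (fun j => l.all (fun i => (g i).testBit j)) := by
  have hle : (l.foldl (fun mask i => mask &&& g i) ((1 <<< K) - 1)) ≤ (1 <<< K) - 1 :=
    andFold_le g l _
  have h2 : (1 : Nat) <<< K = 2 ^ K := Nat.one_shiftLeft K
  have h3 : (1 : Nat) <<< K - 1 < 2 ^ K := by
    rw [h2]
    have := Nat.one_le_two_pow (n := K)
    omega
  have hlt : (l.foldl (fun mask i => mask &&& g i) ((1 <<< K) - 1)) < 2 ^ K :=
    lt_of_le_of_lt hle h3
  rw [pvPopcount_eq K _ hlt]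
  apply List.countP_congr
  intro j hj
  rw [List.mem_range] at hj
  rw [andFold_testBit, testBit_full]
  simp [hj]

theorem lock_count (R0 W0 : Nat) (keysL : List (List (List Char))) (m : List (List Char)) :
    (keysL.map (fun mk => (PySem.List.pyRange 0 (W0 : Int)).map (fun i => keyH mk i))).countP
      (fun key => (PySem.List.pyRange 0 (W0 : Int)).all
        (fun i => decide (PySem.List.pyGetD ((PySem.List.pyRange 0 (W0 : Int)).map (fun c => lockH m c)) i 0
          + PySem.List.pyGetD key i 0 + 2 ≤ (R0 : Int))))
    = pvPopcount ((PySem.List.pyRange 0 (W0 : Int)).foldl (fun mask i =>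
        mask &&& (if 0 ≤ (R0 : Int) - 2 - lockH m i
          then PySem.List.pyGetD (PySem.List.pyGetD
            ((PySem.List.pyRange 0 (W0 : Int)).map (fun i => (PySem.List.pyRange 0 (R0 : Int)).map
              (fun t => ormask (keysL.map (fun mk => (PySem.List.pyRange 0 (W0 : Int)).map (fun i => keyH mk i))) i t)))
            i []) ((R0 : Int) - 2 - lockH m i) 0
          else 0)) ((1 <<< keysL.length) - 1)) := by
  rw [popcount_andFold keysL.length]
  rw [← countP_range_getD (keysL.map (fun mk => (PySem.List.pyRange 0 (W0 : Int)).map (fun i => keyH mk i)))]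
  rw [List.length_map]
  apply countP_congr_mem
  intro j hj
  rw [List.mem_range] at hj
  have hkhj : (keysL.map (fun mk => (PySem.List.pyRange 0 (W0 : Int)).map (fun i => keyH mk i))).getD j []
      = (PySem.List.pyRange 0 (W0 : Int)).map (fun i => keyH (keysL[j]'hj) i) := by
    rw [List.getD_eq_getElem _ _ (by rw [List.length_map]; exact hj), List.getElem_map]
  have hcol : ∀ k : Nat, k < W0 →
      ((if 0 ≤ (R0 : Int) - 2 - lockH m (k : Int)
        then PySem.List.pyGetD (PySem.List.pyGetD
          ((PySem.List.pyRange 0 (W0 : Int)).map (fun i => (PySem.List.pyRange 0 (R0 : Int)).map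
            (fun t => ormask (keysL.map (fun mk => (PySem.List.pyRange 0 (W0 : Int)).map (fun i => keyH mk i))) i t)))
          (k : Int) []) ((R0 : Int) - 2 - lockH m (k : Int)) 0
        else 0).testBit j)
      = decide (PySem.List.pyGetD ((PySem.List.pyRange 0 (W0 : Int)).map (fun c => lockH m c)) (k : Int) 0
          + PySem.List.pyGetD ((PySem.List.pyRange 0 (W0 : Int)).map (fun i => keyH (keysL[j]'hj) i)) (k : Int) 0
          + 2 ≤ (R0 : Int)) := by
    intro k hk
    rw [getD_pyRange_map W0 (fun c => lockH m c) 0 k hk,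
        getD_pyRange_map W0 (fun i => keyH (keysL[j]'hj) i) 0 k hk]
    by_cases hpos : 0 ≤ (R0 : Int) - 2 - lockH m (k : Int)
    · rw [if_pos hpos, getD_pyRange_map W0 _ [] k hk]
      have hlnn := lockH_nonneg m (k : Int)
      obtain ⟨tn, htn⟩ : ∃ tn : Nat, (R0 : Int) - 2 - lockH m (k : Int) = (tn : Int) :=
        ⟨((R0 : Int) - 2 - lockH m (k : Int)).toNat, (Int.toNat_of_nonneg hpos).symm⟩
      have htnR : tn < R0 := by omega
      rw [htn, getD_pyRange_map R0 _ 0 tn htnR]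
      rw [ormask_testBit]
      rw [PySem.List.pyGetD_natCast, PySem.List.pyGetD_natCast, hkhj]
      have hjlen : j < (keysL.map (fun mk => (PySem.List.pyRange 0 (W0 : Int)).map (fun i => keyH mk i))).length := by
        rw [List.length_map]; exact hj
      have hgetk : (List.map (fun i => keyH (keysL[j]'hj) i) (PySem.List.pyRange 0 (W0 : Int))).getD k 0
          = keyH (keysL[j]'hj) (k : Int) := by
        rw [PySem.List.pyRange_zero_natCast, List.map_map,
          List.getD_eq_getElem _ _ (by simpa using hk)]
        simp
      rw [hgetk]
      simp only [hjlen, decide_true, Bool.true_and]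
      rw [decide_eq_decide]
      omega
    · rw [if_neg hpos]
      simp only [Nat.zero_testBit]
      symm
      rw [decide_eq_false_iff_not]
      have := keyH_nonneg (keysL[j]'hj) (k : Int)
      omega
  rw [hkhj]
  apply all_congr_mem
  intro i hi
  obtain ⟨k, hk, rfl⟩ : ∃ k : Nat, k < W0 ∧ (k : Int) = i := by
    rw [PySem.List.pyRange_zero_natCast] at hi
    obtain ⟨k, hk, rfl⟩ := List.mem_map.mp hi
    rw [List.mem_range] at hk
    exact ⟨k, hk, rfl⟩
  exact (hcol k hk).symm

theorem main_eq (data : String) (hpre : Pre_solve data) : solve data = solve_alt data := by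
  unfold Pre_solve at hpre
  simp only [solve, solve_alt]
  rcases hds : PySem.Chars.splitOn data.toList ['\n', '\n'] with _ | ⟨d, ds'⟩
  · rfl
  · rw [hds] at hpre
    simp only [List.map_cons, List.headI] at hpre ⊢
    have hn : ∀ i ∈ d :: ds', (PySem.Chars.splitOn i ['\n']).length =
        (PySem.Chars.splitOn d ['\n']).length := by
      intro i hi
      exact (hpre _ (List.mem_cons.mpr (by
        rcases List.mem_cons.mp hi with rfl | hi'
        · exact Or.inl rfl
        · exact Or.inr (List.mem_map_of_mem hi')))).1
    have hb : ∀ i ∈ d :: ds', (PySem.List.pyGetD (PySem.Chars.splitOn i ['\n']) 0 []).length =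
        (PySem.Chars.splitOn d ['\n']).headI.length := by
      intro i hi
      have hmem : PySem.Chars.splitOn i ['\n'] ∈
          PySem.Chars.splitOn d ['\n'] :: ds'.map (fun i => PySem.Chars.splitOn i ['\n']) := by
        rcases List.mem_cons.mp hi with rfl | hi'
        · exact List.mem_cons_self ..
        · exact List.mem_cons_of_mem _ (List.mem_map_of_mem hi')
      rcases hmm : PySem.Chars.splitOn i ['\n'] with _ | ⟨r, rs⟩
      · have h0 : (PySem.Chars.splitOn d ['\n']).length = 0 := by
          have h00 := (hpre _ hmem).1
          rw [hmm] at h00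
          exact h00.symm
        have hd0 : PySem.Chars.splitOn d ['\n'] = [] := List.eq_nil_of_length_eq_zero h0
        rw [hd0]
        rfl
      · have hget : PySem.List.pyGetD (r :: rs) (0 : Int) [] = r := by
          simp

        rw [hget]
        have := (hpre _ hmem).2 r (by rw [hmm]; exact List.mem_cons_self ..)
        exact this
    rw [foldA_char (PySem.Chars.splitOn d ['\n']).length
        (PySem.Chars.splitOn d ['\n']).headI.length _ hn hb]
    simp only [List.map_cons, List.isEmpty_cons, Bool.false_eq_true, if_false, List.nil_append]
    have hget0 : PySem.List.pyGetD
        (PySem.Chars.splitOn d ['\n'] :: ds'.map (fun i => PySem.Chars.splitOn i ['\n']))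
        (0 : Int) [] = PySem.Chars.splitOn d ['\n'] := by
      simp
    simp only [hget0, PySem.List.len_eq, hb d (by simp)]
    have hiso : (fun (m : List (List Char)) => PySem.List.pyGetD m 0 [] ==
        PySem.List.pyRepeat ['.'] ((((PySem.List.pyGetD m 0 []).length : Nat)) : Int)) = isKeyB := by
      funext m
      simp [isKeyB, PySem.List.len_eq]
    have hisneg : (fun (m : List (List Char)) => !(PySem.List.pyGetD m 0 [] ==
        PySem.List.pyRepeat ['.'] ((((PySem.List.pyGetD m 0 []).length : Nat)) : Int))) =
        (fun m => !isKeyB m) := by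
      funext m
      simp [isKeyB, PySem.List.len_eq]
    rw [hiso, hisneg]
    have hwB : ∀ mk ∈ (PySem.Chars.splitOn d ['\n'] :: ds'.map (fun i => PySem.Chars.splitOn i ['\n'])),
        (PySem.List.pyGetD mk 0 []).length = (PySem.Chars.splitOn d ['\n']).headI.length := by
      intro mk hmk
      rcases List.mem_cons.mp hmk with rfl | h
      · exact hb d (by simp)
      · obtain ⟨i, hi, rfl⟩ := List.mem_map.mp h
        exact hb i (List.mem_cons_of_mem _ hi)
    have hkeysmap : (List.filter isKeyB (PySem.Chars.splitOn d ['\n'] ::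
          ds'.map (fun i => PySem.Chars.splitOn i ['\n']))).map keyProfA =
        (List.filter isKeyB (PySem.Chars.splitOn d ['\n'] ::
          ds'.map (fun i => PySem.Chars.splitOn i ['\n']))).map
          (fun mk => (PySem.List.pyRange 0 ((PySem.Chars.splitOn d ['\n']).headI.length : Int)).map
            (fun i => keyH mk i)) := by
      apply List.map_congr_left
      intro mk hmk
      rw [keyProfA_map, PySem.List.len_eq, hwB mk (List.mem_of_mem_filter hmk)]
    rw [hkeysmap, List.foldl_map]
    apply PySem.List.foldl_congr_mem
    intro res m hm
    rw [lockProfA_map, PySem.List.len_eq, hwB m (List.mem_of_mem_filter hm)]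
    rw [PySem.List.foldl_if_add_one]
    congr 1
    have h := lock_count (PySem.Chars.splitOn d ['\n']).length
      (PySem.Chars.splitOn d ['\n']).headI.length
      (List.filter isKeyB (PySem.Chars.splitOn d ['\n'] ::
        ds'.map (fun i => PySem.Chars.splitOn i ['\n']))) m
    exact_mod_cast congrArg (fun x : Nat => (x : Int)) h

-- ===== VERDICT (by name: the statement is the Claim_ definition above) =====
theorem solve_spec : Claim_equal_solve := by
  intro data _ hpre
  unfold Spec_solve
  exact main_eq data hpre
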